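-- pv_equiv track=rewrite | github.com/hamid-py/Numeric-Matrix-Processor | main.py | side_diagnal
-- ===== SOURCE A (Python) =====
-- def side_diagnal(first_matrix, first_row, first_column):
--     transpose_matrix = []
--     for i in range(int(first_column)):
--         transpose_matrix.append([j for j in range(int(first_row))])
--     for i in range(int(first_row)):
--         for j in range(int(first_column)):
--             transpose_matrix[int(first_column) - 1 - j][int(first_row) - 1 - i] = (first_matrix[i][j])
--     return transpose_matrix
-- ===== SOURCE B (Python) =====
-- def side_diagnal(first_matrix, first_row, first_column):
--     row_n = int(first_row)
--     col_n = int(first_column)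
--     transpose = []
--     for j in range(col_n):
--         transpose.append([first_matrix[i][j] for i in range(row_n)])
--     return [col[::-1] for col in transpose[::-1]]
-- ===== Notes on version B (the rewrite author's own statement) =====
-- stated objective: alternative
-- what changed: B first builds the ordinary transpose column-by-column and then reverses both axes with slicing (anti-transpose = rev . transpose . map rev), instead of pre-allocating a placeholder matrix and scattering each input cell into its anti-diagonal target by index assignment.
import Mathlib
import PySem

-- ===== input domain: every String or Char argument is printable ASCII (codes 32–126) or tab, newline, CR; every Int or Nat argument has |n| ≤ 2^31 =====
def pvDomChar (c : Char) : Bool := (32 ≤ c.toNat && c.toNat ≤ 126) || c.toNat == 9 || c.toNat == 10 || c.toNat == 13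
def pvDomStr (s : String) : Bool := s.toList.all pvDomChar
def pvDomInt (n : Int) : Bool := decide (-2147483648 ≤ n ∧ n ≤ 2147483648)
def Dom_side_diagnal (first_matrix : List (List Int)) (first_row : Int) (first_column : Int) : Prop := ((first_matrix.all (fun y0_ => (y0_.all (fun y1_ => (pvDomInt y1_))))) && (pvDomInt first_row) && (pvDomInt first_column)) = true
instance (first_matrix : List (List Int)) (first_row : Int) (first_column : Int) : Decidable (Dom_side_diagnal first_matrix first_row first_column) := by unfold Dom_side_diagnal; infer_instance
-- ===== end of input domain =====

-- B replaces A's pre-allocate-then-scatter loops by: build the ordinary transpose, then reverse both axes (same cost; a different decomposition).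

-- ===== PORT A =====
-- literal transliteration: build C placeholder rows [0..R-1], then scatter
-- first_matrix[i][j] into transpose_matrix[C-1-j][R-1-i]; the reads use pyGetD
-- (Pre_ excludes the inputs where Python raises IndexError).
def side_diagnal (first_matrix : List (List Int)) (first_row : Int) (first_column : Int) : List (List Int) :=
  let transpose_matrix :=
    (PySem.List.pyRange 0 first_column 1).foldl
      (fun tm _ => tm ++ [PySem.List.pyRange 0 first_row 1]) []
  (PySem.List.pyRange 0 first_row 1).foldl (fun tm i =>
    (PySem.List.pyRange 0 first_column 1).foldl (fun tm j =>
      PySem.List.pySetD tm (first_column - 1 - j)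
        (PySem.List.pySetD (PySem.List.pyGetD tm (first_column - 1 - j) [])
          (first_row - 1 - i)
          (PySem.List.pyGetD (PySem.List.pyGetD first_matrix i []) j 0))) tm)
    transpose_matrix

-- ===== PORT B =====
-- literal transliteration of Source B: build the standard transpose column-by-column
-- (loop with append), then reverse the row list and each row; the slices
-- transpose[::-1] and col[::-1] are list reversal (PySem.List.slice?_none_none_neg_one).
def side_diagnal_alt (first_matrix : List (List Int)) (first_row : Int) (first_column : Int) : List (List Int) :=
  let transpose :=
    (PySem.List.pyRange 0 first_column 1).foldl
      (fun t j => t ++ [(PySem.List.pyRange 0 first_row 1).map (fun i =>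
        PySem.List.pyGetD (PySem.List.pyGetD first_matrix i []) j 0)]) []
  transpose.reverse.map (fun col => col.reverse)

-- ===== PRECONDITION & SPEC =====
-- Pre_ excludes exactly the inputs where Python A raises IndexError:
-- 0 < first_row and 0 < first_column but the matrix has fewer than first_row
-- rows, or one of its first first_row rows has fewer than first_column entries.
def Pre_side_diagnal (first_matrix : List (List Int)) (first_row : Int) (first_column : Int) : Prop :=
  first_row ≤ 0 ∨ first_column ≤ 0 ∨
    (first_row ≤ (first_matrix.length : Int) ∧
      ∀ row ∈ first_matrix.take first_row.toNat, first_column ≤ (row.length : Int))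

instance (first_matrix : List (List Int)) (first_row : Int) (first_column : Int) : Decidable (Pre_side_diagnal first_matrix first_row first_column) := by
  unfold Pre_side_diagnal; infer_instance

def pvWitness_side_diagnal : List (List Int) × Int × Int := ([[1, 2], [3, 4]], 2, 2)

def Spec_side_diagnal (first_matrix : List (List Int)) (first_row : Int) (first_column : Int) (out : List (List Int)) : Prop := out = side_diagnal_alt first_matrix first_row first_column
instance (first_matrix : List (List Int)) (first_row : Int) (first_column : Int) (out : List (List Int)) : Decidable (Spec_side_diagnal first_matrix first_row first_column out) := by unfold Spec_side_diagnal; infer_instance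

-- ===== CLAIM (what is proved, stated in full; the proofs are below) =====
def Claim_equal_side_diagnal : Prop := ∀ (first_matrix : List (List Int)) (first_row : Int) (first_column : Int), Dom_side_diagnal first_matrix first_row first_column → Pre_side_diagnal first_matrix first_row first_column → Spec_side_diagnal first_matrix first_row first_column (side_diagnal first_matrix first_row first_column)

-- ===== LEMMAS AND PROOFS =====

-- proof-only intermediate form: the pointwise gather out[a][b] = M[R-1-b][C-1-a];
-- both ports are shown equal to it
def pvGather (first_matrix : List (List Int)) (first_row : Int) (first_column : Int) : List (List Int) :=
  (PySem.List.pyRange 0 first_column 1).map (fun a =>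
    (PySem.List.pyRange 0 first_row 1).map (fun b =>
      PySem.List.pyGetD
        (PySem.List.pyGetD first_matrix (first_row - 1 - b) [])
        (first_column - 1 - a) 0))

-- reversing a map over range(0,n) flips the index
theorem rev_pyRange_map {α : Type} (f : Int → α) (n : Int) :
    ((PySem.List.pyRange 0 n 1).map f).reverse =
      (PySem.List.pyRange 0 n 1).map (fun a => f (n - 1 - a)) := by
  apply List.ext_getElem
  · simp
  · intro k h1 h2
    have hlen : (PySem.List.pyRange 0 n 1).length = (n - 0).toNat :=
      PySem.List.length_pyRange_one 0 n
    simp only [List.length_map, List.length_reverse, hlen] at h1 h2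
    simp only [List.getElem_reverse, List.getElem_map, List.length_map, hlen]
    rw [PySem.List.getElem_pyRange_one, PySem.List.getElem_pyRange_one]
    congr 1
    omega

-- B equals the gather form on every input
theorem alt_eq_gather (fm : List (List Int)) (r c : Int) :
    side_diagnal_alt fm r c = pvGather fm r c := by
  unfold side_diagnal_alt pvGather
  rw [PySem.List.foldl_append_singleton_eq_map]
  simp only [List.nil_append]
  rw [rev_pyRange_map, List.map_map]
  simp only [Function.comp_def, rev_pyRange_map]

-- length is preserved by a fold of in-place updates
theorem length_foldl_set {α : Type} (f : Nat → α → α) (d : α) (l : List Nat) :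
    ∀ xs : List α,
      (l.foldl (fun ys a => ys.set a (f a (ys.getD a d))) xs).length = xs.length := by
  induction l with
  | nil => intro xs; rfl
  | cons a l ih => intro xs; simpa using ih (xs.set a (f a (xs.getD a d)))

-- a fold of updates at pairwise-distinct positions, characterised pointwise
theorem foldl_set_getD {α : Type} (f : Nat → α → α) (d : α) :
    ∀ (l : List Nat) (xs : List α), l.Nodup → (∀ a ∈ l, a < xs.length) →
    ∀ k : Nat,
      (l.foldl (fun ys a => ys.set a (f a (ys.getD a d))) xs)[k]? =
        if k ∈ l then some (f k (xs.getD k d)) else xs[k]? := by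
  intro l
  induction l with
  | nil => intro xs _ _ k; simp
  | cons a l ih =>
    intro xs hnd hb k
    have ha : a < xs.length := hb a (by simp)
    have hal : a ∉ l := (List.nodup_cons.mp hnd).1
    simp only [List.foldl_cons]
    rw [ih (xs.set a (f a (xs.getD a d))) (List.nodup_cons.mp hnd).2
        (by intro b hbm; simpa using hb b (List.mem_cons_of_mem a hbm))]
    by_cases hk : k ∈ l
    · have hka : k ≠ a := fun h => hal (h ▸ hk)
      simp [hk, hka, List.getD_eq_getElem?_getD, List.getElem?_set_ne (Ne.symm hka)]
    · by_cases hka : k = a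
      · subst hka
        simp [hk, List.getElem?_set_self ha, List.getD_eq_getElem?_getD,
          List.getElem?_eq_getElem ha]
      · simp [hk, hka, List.getElem?_set_ne (fun h => hka h.symm)]

-- a fold whose every step acts row-pointwise acts pointwise as a whole
theorem foldl_pointwise {α ι : Type} (C : Nat) (g : ι → Nat → α → α) :
    ∀ (l : List ι) (step : List α → ι → List α),
      (∀ tm, tm.length = C → ∀ i ∈ l, (step tm i).length = C) →
      (∀ tm, tm.length = C → ∀ i ∈ l, ∀ a : Nat, (step tm i)[a]? = (tm[a]?).map (g i a)) →
      ∀ (tm : List α), tm.length = C → ∀ a : Nat,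
        (l.foldl step tm)[a]? =
          (tm[a]?).map (fun row => l.foldl (fun row i => g i a row) row) := by
  intro l
  induction l with
  | nil => intro step _ _ tm _ a; simp
  | cons i l ih =>
    intro step hlen hstep tm htm a
    simp only [List.foldl_cons]
    rw [ih step (fun tm h j hj => hlen tm h j (List.mem_cons_of_mem i hj))
        (fun tm h j hj => hstep tm h j (List.mem_cons_of_mem i hj))
        (step tm i) (hlen tm htm i (by simp)) a,
      hstep tm htm i (by simp) a]
    cases tm[a]? <;> simp

-- the descending index list hits exactly 0,…,C-1
theorem mem_rev_range (C k : Nat) : k ∈ (List.range C).map (fun j => C - 1 - j) ↔ k < C := by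
  simp only [List.mem_map, List.mem_range]
  constructor
  · rintro ⟨j, hj, rfl⟩; omega
  · intro hk; exact ⟨C - 1 - k, by omega, by omega⟩

theorem nodup_rev_range (C : Nat) : ((List.range C).map (fun j => C - 1 - j)).Nodup :=
  List.Nodup.map_on (fun x hx y hy h => by
    simp only [List.mem_range] at hx hy; omega) (List.nodup_range)

-- A equals the gather form, with both dimensions nonnegative
theorem side_diagnal_eq_gather (fm : List (List Int)) (r c : Int) (hr : 0 ≤ r) (hc : 0 ≤ c) :
    side_diagnal fm r c = pvGather fm r c := by
  set R : Nat := r.toNat with hR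
  set C : Nat := c.toNat with hC
  have hrc : r = (R : Int) := by omega
  have hcc : c = (C : Int) := by omega
  -- normalise both programs to Nat-indexed forms
  rw [hrc, hcc]
  unfold side_diagnal pvGather
  rw [PySem.List.pyRange_zero_natCast R, PySem.List.pyRange_zero_natCast C]
  simp only [List.foldl_map, List.map_map]
  -- the initial matrix is C copies of the placeholder row
  rw [PySem.List.foldl_append_singleton_eq_map]
  simp only [List.nil_append]
  -- rewrite A's scatter body into the canonical set/getD shape on Nat indices
  have hbody : ∀ (tm : List (List Int)), ∀ i ∈ List.range R,
      (List.range C).foldl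
        (fun tm (j : Nat) => PySem.List.pySetD tm ((C : Int) - 1 - (j : Int))
          (PySem.List.pySetD (PySem.List.pyGetD tm ((C : Int) - 1 - (j : Int)) [])
            ((R : Int) - 1 - (i : Int))
            (PySem.List.pyGetD (PySem.List.pyGetD fm (i : Int) []) (j : Int) 0))) tm =
      ((List.range C).map (fun j => C - 1 - j)).foldl
        (fun tm a => tm.set a
          ((tm.getD a []).set (R - 1 - i)
            (PySem.List.pyGetD (PySem.List.pyGetD fm (i : Int) []) ((C - 1 - a : Nat) : Int) 0))) tm := by
    intro tm i hi
    rw [List.foldl_map]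
    refine PySem.List.foldl_congr_mem _ _ _ tm (fun tm' j hj => ?_)
    have hjC : j < C := List.mem_range.mp hj
    have hiR : i < R := List.mem_range.mp hi
    have e1 : (C : Int) - 1 - (j : Int) = ((C - 1 - j : Nat) : Int) := by omega
    have e2 : C - 1 - (C - 1 - j) = j := by omega
    have e3 : ((R : Int) - 1 - (i : Int)) = ((R - 1 - i : Nat) : Int) := by omega
    rw [e1, e3]
    simp [e2, List.getD]
  -- pointwise description of the whole scatter fold
  apply List.ext_getElem?
  intro a
  rw [PySem.List.foldl_congr_mem _ _ _ _ hbody]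
  rw [foldl_pointwise C
      (fun i a row => row.set (R - 1 - i)
        (PySem.List.pyGetD (PySem.List.pyGetD fm (i : Int) []) ((C - 1 - a : Nat) : Int) 0))
      (List.range R) _
      (fun tm htm i _ => by
        rw [length_foldl_set
          (fun a row => row.set (R - 1 - i)
            (PySem.List.pyGetD (PySem.List.pyGetD fm (i : Int) []) ((C - 1 - a : Nat) : Int) 0)) []]
        exact htm)
      (fun tm htm i hi a => by
        rw [foldl_set_getD
            (fun a row => row.set (R - 1 - i)
              (PySem.List.pyGetD (PySem.List.pyGetD fm (i : Int) []) ((C - 1 - a : Nat) : Int) 0))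
            [] _ tm (nodup_rev_range C)
            (fun b hb => by rw [htm]; exact (mem_rev_range C b).mp hb) a]
        simp only [mem_rev_range]
        by_cases hac : a < C
        · have hl : a < tm.length := htm ▸ hac
          simp [hac, List.getD_eq_getElem?_getD, List.getElem?_eq_getElem hl]
        · have hl : tm.length ≤ a := by omega
          simp [hac, List.getElem?_eq_none hl])
      _ (by simp) a]
  simp only [List.getElem?_map]
  by_cases haC : a < C
  · -- row a exists on both sides
    rw [show (List.range C)[a]? = some a from by simp [haC]]
    simp only [Option.map_some, Function.comp]
    congr 1
    -- the row-level fold: positions R-1-i, i ∈ range R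
    have hrow :
        (List.range R).foldl
          (fun row i => row.set (R - 1 - i)
            (PySem.List.pyGetD (PySem.List.pyGetD fm (i : Int) []) ((C - 1 - a : Nat) : Int) 0))
          ((List.range R).map (fun k : Nat => (k : Int))) =
        ((List.range R).map (fun i => R - 1 - i)).foldl
          (fun row b => row.set b
            (PySem.List.pyGetD (PySem.List.pyGetD fm ((R - 1 - b : Nat) : Int) []) ((C - 1 - a : Nat) : Int) 0))
          ((List.range R).map (fun k : Nat => (k : Int))) := by
      rw [List.foldl_map]
      refine PySem.List.foldl_congr_mem _ _ _ _ (fun row' i hi => ?_)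
      have hiR : i < R := List.mem_range.mp hi
      have e : R - 1 - (R - 1 - i) = i := by omega
      rw [e]
    rw [hrow]
    apply List.ext_getElem?
    intro b
    rw [foldl_set_getD
        (fun b _ => PySem.List.pyGetD (PySem.List.pyGetD fm ((R - 1 - b : Nat) : Int) []) ((C - 1 - a : Nat) : Int) 0)
        0 _ _ (nodup_rev_range R)
        (fun b hb => by simpa using (mem_rev_range R b).mp hb) b]
    simp only [mem_rev_range, List.getElem?_map]
    by_cases hbR : b < R
    · rw [show (List.range R)[b]? = some b from by simp [hbR]]
      simp only [if_pos hbR, Option.map_some]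
      have e1 : ((R - 1 - b : Nat) : Int) = (R : Int) - 1 - (b : Int) := by omega
      have e2 : ((C - 1 - a : Nat) : Int) = (C : Int) - 1 - (a : Int) := by omega
      rw [e1, e2]
      rfl
    · rw [show (List.range R)[b]? = none from by simp [hbR]]
      simp [hbR]
  · rw [show (List.range C)[a]? = none from by simp [haC]]
    simp

-- ===== VERDICT (by name: the statement is the Claim_ definition above) =====
theorem side_diagnal_spec : Claim_equal_side_diagnal := by
  intro fm r c _ _
  unfold Spec_side_diagnal
  rw [alt_eq_gather]
  by_cases hr : 0 ≤ r
  · by_cases hc : 0 ≤ c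
    · exact side_diagnal_eq_gather fm r c hr hc
    · -- first_column < 0: both programs return []
      have h : PySem.List.pyRange 0 c 1 = [] := PySem.List.pyRange_one_eq_nil (by omega)
      simp [side_diagnal, pvGather, h]
  · -- first_row < 0: placeholder rows are empty, no scatter happens
    have h : PySem.List.pyRange 0 r 1 = [] := PySem.List.pyRange_one_eq_nil (by omega)
    simp [side_diagnal, pvGather, h,
      PySem.List.foldl_append_singleton_eq_map (fun _ => ([] : List Int)) _ []]
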